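-- pv_equiv track=rewrite | github.com/pypi-data/pypi-mirror-386 | packages/noveler/noveler-3.0.0.tar.gz/noveler-3.0.0/src/mcp_servers/noveler/core/response_parser.py | _parse_error_output
-- ===== SOURCE A (Python) =====
-- from typing import Any
--
-- def _parse_error_output(stderr: str) -> dict[str, Any]:
--     """Parse error output and categorise the failure type.
--
--     Args:
--         stderr (str): Captured error output.
--
--     Returns:
--         dict[str, Any]: Parsed error metadata including type, message,
--         and traceback information if available.
--     """
--     error_info = {}
--
--     # エラーメッセージの分類
--     if "FileNotFoundError" in stderr:
--         error_info["error_type"] = "file_not_found"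
--     elif "PermissionError" in stderr:
--         error_info["error_type"] = "permission_denied"
--     elif "ValidationError" in stderr:
--         error_info["error_type"] = "validation_error"
--     elif "JSONDecodeError" in stderr:
--         error_info["error_type"] = "json_decode_error"
--     else:
--         error_info["error_type"] = "unknown"
--
--     # エラーメッセージの抽出
--     error_info["error_message"] = stderr.strip()
--
--     # トレースバック情報の抽出
--     if "Traceback" in stderr:
--         traceback_lines = []
--         lines = stderr.split("\n")
--         in_traceback = False
--
--         for line in lines:
--             if "Traceback" in line:
--                 in_traceback = True
--             if in_traceback:
--                 traceback_lines.append(line)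
--
--         error_info["traceback"] = "\n".join(traceback_lines)
--
--     return error_info
-- ===== SOURCE B (Python) =====
-- _MARKERS = ["FileNotFoundError", "PermissionError", "ValidationError", "JSONDecodeError"]
-- _TYPES = ["file_not_found", "permission_denied", "validation_error", "json_decode_error"]
--
--
-- def _parse_error_output(stderr: str) -> dict:
--     # single backward pass over the lines: classify per line (keeping the
--     # highest-priority marker seen anywhere) and remember the earliest line
--     # containing "Traceback".  No substring test ever touches the whole string:
--     # every marker is newline-free, so it occurs in stderr iff it occurs in a line.
--     lines = stderr.split("\n")
--     best = None   # smallest marker index matched by any line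
--     ti = None     # index of the first line containing "Traceback"
--     for i in range(len(lines) - 1, -1, -1):
--         line = lines[i]
--         if "Traceback" in line:
--             ti = i
--         for j, sub in enumerate(_MARKERS):
--             if sub in line:
--                 if best is None or j < best:
--                     best = j
--                 break
--     info = {
--         "error_type": _TYPES[best] if best is not None else "unknown",
--         "error_message": stderr.strip(),
--     }
--     if ti is not None:
--         info["traceback"] = "\n".join(lines[ti:])
--     return info
-- ===== Notes on version B (the rewrite author's own statement) =====
-- stated objective: alternative
-- what changed: B splits stderr into lines once and makes a single backward pass over them, classifying per line with a min-priority accumulator and recording the index of the earliest line containing the traceback marker, instead of A's whole-string substring if/elif chain plus a separate forward flag loop; correct because every marker is newline-free, so it occurs in stderr iff it occurs in some line.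
import Mathlib
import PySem

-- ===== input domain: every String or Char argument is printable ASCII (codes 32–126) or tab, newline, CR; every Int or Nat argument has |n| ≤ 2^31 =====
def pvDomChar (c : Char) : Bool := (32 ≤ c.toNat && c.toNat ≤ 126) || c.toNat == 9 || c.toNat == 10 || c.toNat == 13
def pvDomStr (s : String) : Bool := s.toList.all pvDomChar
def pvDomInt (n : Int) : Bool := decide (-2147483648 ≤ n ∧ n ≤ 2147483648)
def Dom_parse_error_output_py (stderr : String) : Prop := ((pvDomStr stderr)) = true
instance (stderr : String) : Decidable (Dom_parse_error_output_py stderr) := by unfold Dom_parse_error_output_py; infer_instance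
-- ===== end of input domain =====

-- B makes a single backward pass over the split lines (min-priority per-line
-- classification + index of the earliest traceback-marker line) instead of A's
-- whole-string if/elif substring chain plus a forward flag loop (objective: alternative).


-- ===== PORT A =====
-- loop body of A's in_traceback flag loop (state: (traceback_lines, in_traceback))
def tbStep (s : List String × Bool) (line : String) : List String × Bool :=
  let inTb := if PySem.Str.isIn "Traceback" line then true else s.2
  (if inTb then s.1 ++ [line] else s.1, inTb)

def parse_error_output_py (stderr : String) : List (String × String) :=
  let d0 : PySem.Dict String String := PySem.Dict.empty
  let d1 :=
    if PySem.Str.isIn "FileNotFoundError" stderr then d0.insert "error_type" "file_not_found"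
    else if PySem.Str.isIn "PermissionError" stderr then d0.insert "error_type" "permission_denied"
    else if PySem.Str.isIn "ValidationError" stderr then d0.insert "error_type" "validation_error"
    else if PySem.Str.isIn "JSONDecodeError" stderr then d0.insert "error_type" "json_decode_error"
    else d0.insert "error_type" "unknown"
  let d2 := d1.insert "error_message" (PySem.Str.strip stderr)
  let d3 :=
    if PySem.Str.isIn "Traceback" stderr then
      -- stderr.split("\n"): sep is the nonempty literal "\n", so split? is some; exact
      let lines := (PySem.Str.split? stderr "\n").getD []
      let st := lines.foldl tbStep ([], false)
      d2.insert "traceback" (PySem.Str.join "\n" st.1)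
    else d2
  d3.items

-- ===== PORT B =====
def pvMarkers : List String :=
  ["FileNotFoundError", "PermissionError", "ValidationError", "JSONDecodeError"]
def pvTypes : List String :=
  ["file_not_found", "permission_denied", "validation_error", "json_decode_error"]

-- body of B's single backward loop; state = (best marker index so far, first 'Traceback' line index so far)
def bStep (st : Option Int × Option Int) (li : Int × String) : Option Int × Option Int :=
  let ti := if PySem.Str.isIn "Traceback" li.2 then some li.1 else st.2
  -- 'for j, sub in enumerate(_MARKERS): if sub in line: …; break'
  let best :=
    match (PySem.List.enumerate pvMarkers).find? (fun js => PySem.Str.isIn js.2 li.2) with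
    | some js =>
      match st.1 with
      | none => some js.1
      | some b => if js.1 < b then some js.1 else some b
    | none => st.1
  (best, ti)

def parse_error_output_py_alt (stderr : String) : List (String × String) :=
  -- stderr.split("\n"): sep is the nonempty literal "\n", so split? is some; exact
  let lines := (PySem.Str.split? stderr "\n").getD []
  -- 'for i in range(len(lines)-1, -1, -1): line = lines[i]; …'
  let st := (PySem.List.enumerate lines).reverse.foldl bStep (none, none)
  let etype :=
    match st.1 with
    | some b => PySem.List.pyGetD pvTypes b ""
    | none => "unknown"
  let base := [("error_type", etype), ("error_message", PySem.Str.strip stderr)]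
  match st.2 with
  | some ti => base ++ [("traceback", PySem.Str.join "\n" (PySem.List.slice lines (some ti) none))]
  | none => base

-- ===== PRECONDITION & SPEC =====
def Spec_parse_error_output_py (stderr : String) (out : List (String × String)) : Prop := out = parse_error_output_py_alt stderr
instance (stderr : String) (out : List (String × String)) : Decidable (Spec_parse_error_output_py stderr out) := by unfold Spec_parse_error_output_py; infer_instance

-- ===== CLAIM (what is proved, stated in full; the proofs are below) =====
def Claim_equal_parse_error_output_py : Prop := ∀ (stderr : String), Dom_parse_error_output_py stderr → Spec_parse_error_output_py stderr (parse_error_output_py stderr)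

-- ===== LEMMAS AND PROOFS =====

-- simple structural recursion computing s.split("\n") on List Char
def splitNL : List Char → List (List Char)
  | [] => [[]]
  | c :: cs =>
    if c = '\n' then [] :: splitNL cs
    else
      match splitNL cs with
      | [] => [[c]]
      | p :: ps => (c :: p) :: ps

theorem splitNL_ne_nil (cs : List Char) : splitNL cs ≠ [] := by
  cases cs with
  | nil => simp [splitNL]
  | cons c cs =>
    simp only [splitNL]
    split_ifs
    · simp
    · cases h : splitNL cs <;> simp

def consHead (x : List Char) : List (List Char) → List (List Char)
  | [] => [x]
  | p :: ps => (x ++ p) :: ps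

theorem go_inv (fuel : Nat) (l cur : List Char) (acc : List (List Char))
    (h : l.length < fuel) :
    PySem.Chars.splitOn.go ['\n'] fuel l cur acc
      = acc.reverse ++ consHead cur.reverse (splitNL l) := by
  induction fuel generalizing l cur acc with
  | zero => omega
  | succ f ih =>
    cases l with
    | nil =>
      rw [PySem.Chars.splitOn.go.eq_2]
      · simp [splitNL, consHead]
      · omega
    | cons c rest =>
      rw [PySem.Chars.splitOn.go.eq_3]
      by_cases hc : c = '\n'
      · subst hc
        have hpre : (['\n'] : List Char).isPrefixOf ('\n' :: rest) = true := by
          simp [List.isPrefixOf]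
        rw [if_pos hpre]
        have hd : List.drop (['\n'] : List Char).length ('\n' :: rest) = rest := rfl
        rw [hd]
        simp only [List.length_cons] at h
        rw [ih _ _ _ (by omega)]
        simp only [splitNL]
        obtain ⟨p, ps, hp⟩ : ∃ p ps, splitNL rest = p :: ps := by
          cases hsp : splitNL rest with
          | nil => exact absurd hsp (splitNL_ne_nil rest)
          | cons p ps => exact ⟨p, ps, rfl⟩
        simp [hp, consHead]
      · have hpre : (['\n'] : List Char).isPrefixOf (c :: rest) = false := by
          simp [List.isPrefixOf]
          intro hcc
          exact absurd hcc.symm hc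
        rw [if_neg (by simp [hpre])]
        simp only [List.length_cons] at h
        rw [ih _ _ _ (by omega)]
        simp only [splitNL, if_neg hc]
        obtain ⟨p, ps, hp⟩ : ∃ p ps, splitNL rest = p :: ps := by
          cases hsp : splitNL rest with
          | nil => exact absurd hsp (splitNL_ne_nil rest)
          | cons p ps => exact ⟨p, ps, rfl⟩
        simp [hp, consHead]

theorem split_eq_splitNL (cs : List Char) :
    PySem.Chars.splitOn cs ['\n'] = splitNL cs := by
  show PySem.Chars.splitOn.go ['\n'] (cs.length + 1) cs [] [] = splitNL cs
  rw [go_inv _ _ _ _ (by omega)]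
  obtain ⟨p, ps, hp⟩ : ∃ p ps, splitNL cs = p :: ps := by
    cases hsp : splitNL cs with
    | nil => exact absurd hsp (splitNL_ne_nil cs)
    | cons p ps => exact ⟨p, ps, rfl⟩
  simp [hp, consHead]

theorem splitNL_head (cs : List Char) :
    ∃ ps, splitNL cs = cs.takeWhile (fun c => !(c == '\n')) :: ps := by
  induction cs with
  | nil => exact ⟨[], rfl⟩
  | cons c cs ih =>
    by_cases hc : c = '\n'
    · subst hc
      refine ⟨splitNL cs, ?_⟩
      simp [splitNL, List.takeWhile]
    · obtain ⟨ps, hp⟩ := ih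
      refine ⟨ps, ?_⟩
      rw [List.takeWhile_cons_of_pos (by simp [hc])]
      simp only [splitNL, if_neg hc, hp]

theorem prefix_takeWhile_of_no_nl (sub l : List Char) (h : sub <+: l)
    (hnl : '\n' ∉ sub) : sub <+: l.takeWhile (fun c => !(c == '\n')) := by
  induction sub generalizing l with
  | nil => exact List.nil_prefix
  | cons a as ih =>
    cases l with
    | nil => exact absurd h (by simp)
    | cons b l =>
      rw [List.cons_prefix_cons] at h
      obtain ⟨rfl, hp⟩ := h
      have ha : a ≠ '\n' := fun hh => hnl (hh ▸ List.mem_cons_self)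
      rw [List.takeWhile_cons_of_pos (by simp [ha]), List.cons_prefix_cons]
      exact ⟨rfl, ih _ hp (fun hm => hnl (List.mem_cons_of_mem _ hm))⟩

theorem infix_splitNL (sub cs : List Char) (hne : sub ≠ []) (hnl : '\n' ∉ sub) :
    sub <:+: cs ↔ ∃ p ∈ splitNL cs, sub <:+: p := by
  induction cs with
  | nil =>
    simp only [splitNL, List.mem_singleton, List.infix_nil]
    constructor
    · intro h; simp at h; exact absurd h hne
    · rintro ⟨p, rfl, h⟩; simp at h; exact absurd h hne
  | cons c cs ih =>
    rw [List.infix_cons_iff]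
    by_cases hc : c = '\n'
    · subst hc
      have hnp : ¬ sub <+: '\n' :: cs := by
        intro h
        cases sub with
        | nil => exact hne rfl
        | cons a as =>
          rw [List.cons_prefix_cons] at h
          exact hnl (h.1 ▸ List.mem_cons_self)
      simp only [splitNL]
      constructor
      · rintro (h | h)
        · exact absurd h hnp
        · obtain ⟨p, hp, hi⟩ := (ih).mp h
          exact ⟨p, List.mem_cons_of_mem _ hp, hi⟩
      · rintro ⟨p, hp, hi⟩
        rcases List.mem_cons.mp hp with rfl | hp
        · rw [List.infix_nil] at hi; exact absurd hi hne
        · exact Or.inr (ih.mpr ⟨p, hp, hi⟩)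
    · obtain ⟨ps, hp⟩ := splitNL_head cs
      have hps : splitNL (c :: cs) = (c :: cs.takeWhile (fun c => !(c == '\n'))) :: ps := by
        simp only [splitNL, if_neg hc, hp]
      set tw := cs.takeWhile (fun c => !(c == '\n')) with htw
      have hpc : sub <+: c :: cs ↔ sub <+: c :: tw := by
        constructor
        · intro h
          have h3 : sub <+: (c :: cs).takeWhile (fun c => !(c == '\n')) :=
            prefix_takeWhile_of_no_nl _ _ h hnl
          rwa [List.takeWhile_cons_of_pos (by simp [hc])] at h3
        · intro h
          exact h.trans (List.cons_prefix_cons.mpr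
            ⟨rfl, (htw ▸ List.takeWhile_prefix _)⟩)
      have hmem : (∃ p ∈ splitNL cs, sub <:+: p) ↔ (sub <:+: tw ∨ ∃ p ∈ ps, sub <:+: p) := by
        rw [hp]
        simp
      constructor
      · rintro (h | h)
        · rw [hpc] at h
          exact ⟨_, hps ▸ List.mem_cons_self, h.isInfix⟩
        · rcases hmem.mp (ih.mp h) with h' | ⟨p, hpm, hi⟩
          · refine ⟨_, hps ▸ List.mem_cons_self, ?_⟩
            exact h'.trans (List.suffix_cons c tw).isInfix
          · exact ⟨p, hps ▸ List.mem_cons_of_mem _ hpm, hi⟩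
      · rintro ⟨p, hpm, hi⟩
        rw [hps] at hpm
        rcases List.mem_cons.mp hpm with rfl | hpm
        · rcases List.infix_cons_iff.mp hi with h | h
          · exact Or.inl (hpc.mpr h)
          · exact Or.inr (ih.mpr (hmem.mpr (Or.inl h)))
        · exact Or.inr (ih.mpr (hmem.mpr (Or.inr ⟨p, hpm, hi⟩)))

-- A's flag loop, once the flag is set, appends every remaining line.
theorem tb_fold_true (lines acc : List String) :
    lines.foldl tbStep (acc, true) = (acc ++ lines, true) := by
  induction lines generalizing acc with
  | nil => simp
  | cons l ls ih =>
    rw [List.foldl_cons]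
    have hstep : tbStep (acc, true) l = (acc ++ [l], true) := by
      simp [tbStep]
    rw [hstep, ih]
    simp

-- A's flag loop with flag unset collects exactly the suffix from the first matching line.
theorem tb_fold_false (lines acc : List String) :
    (lines.foldl tbStep (acc, false)).1 =
      acc ++ lines.drop (((lines.findIdx? (fun line => PySem.Str.isIn "Traceback" line)).getD lines.length)) := by
  induction lines generalizing acc with
  | nil => simp
  | cons l ls ih =>
    rw [List.foldl_cons]
    by_cases h : PySem.Str.isIn "Traceback" l
    · have hstep : tbStep (acc, false) l = (acc ++ [l], true) := by
        simp only [tbStep, h, if_true]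
      rw [hstep, tb_fold_true, List.findIdx?_cons, if_pos h]
      simp
    · have hstep : tbStep (acc, false) l = (acc, false) := by
        simp only [tbStep]
        rw [if_neg h]
        simp
      rw [hstep, ih, List.findIdx?_cons, if_neg h]
      cases hf : ls.findIdx? (fun line => PySem.Str.isIn "Traceback" line) <;> simp

-- A's if/elif chain inserts the same key in every branch: hoist the if into the value.
theorem if_insert_error_type (s : String) :
    (if PySem.Str.isIn "FileNotFoundError" s then (PySem.Dict.empty : PySem.Dict String String).insert "error_type" "file_not_found"
     else if PySem.Str.isIn "PermissionError" s then (PySem.Dict.empty : PySem.Dict String String).insert "error_type" "permission_denied"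
     else if PySem.Str.isIn "ValidationError" s then (PySem.Dict.empty : PySem.Dict String String).insert "error_type" "validation_error"
     else if PySem.Str.isIn "JSONDecodeError" s then (PySem.Dict.empty : PySem.Dict String String).insert "error_type" "json_decode_error"
     else (PySem.Dict.empty : PySem.Dict String String).insert "error_type" "unknown")
    = (PySem.Dict.empty : PySem.Dict String String).insert "error_type"
        (if PySem.Str.isIn "FileNotFoundError" s then "file_not_found"
         else if PySem.Str.isIn "PermissionError" s then "permission_denied"
         else if PySem.Str.isIn "ValidationError" s then "validation_error"
         else if PySem.Str.isIn "JSONDecodeError" s then "json_decode_error"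
         else "unknown") := by
  split_ifs <;> rfl

theorem items2 (t m : String) :
    (((PySem.Dict.empty : PySem.Dict String String).insert "error_type" t).insert "error_message" m).items
      = [("error_type", t), ("error_message", m)] := rfl

theorem items3 (t m tb : String) :
    ((((PySem.Dict.empty : PySem.Dict String String).insert "error_type" t).insert "error_message" m).insert "traceback" tb).items
      = [("error_type", t), ("error_message", m), ("traceback", tb)] := rfl

-- a newline-free substring occurs in the string iff it occurs in one of its lines
theorem isIn_any_lines (sub s : String) (lines : List String)
    (hL : lines.map String.toList = splitNL s.toList)
    (hne : sub.toList ≠ []) (hnl : '\n' ∉ sub.toList) :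
    PySem.Str.isIn sub s = lines.any (fun line => PySem.Str.isIn sub line) := by
  rw [PySem.Str.isIn_eq]
  have h1 : PySem.Chars.isIn sub.toList s.toList
      = (splitNL s.toList).any (fun p => PySem.Chars.isIn sub.toList p) := by
    apply Bool.eq_iff_iff.mpr
    simp only [PySem.Chars.isIn_iff_infix, List.any_eq_true]
    exact infix_splitNL _ _ hne hnl
  rw [h1, ← hL, List.any_map]
  apply PySem.List.any_congr_mem
  intro x _
  simp [PySem.Str.isIn_eq]

theorem split_lines (s : String) :
    ∃ lines, PySem.Str.split? s "\n" = some lines ∧ lines.map String.toList = splitNL s.toList := by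
  have h := PySem.Str.split?_map s "\n"
  have hsep : ("\n" : String).toList = ['\n'] := by decide
  rw [hsep] at h
  cases hs : PySem.Str.split? s "\n" with
  | none => rw [hs] at h; simp [PySem.Chars.split?] at h
  | some L =>
    refine ⟨L, rfl, ?_⟩
    rw [hs] at h
    simp only [Option.map_some] at h
    have h2 : PySem.Chars.split? s.toList ['\n'] = some (splitNL s.toList) := by
      simp [PySem.Chars.split?, split_eq_splitNL]
    rw [h2] at h
    exact Option.some.inj h

-- option-valued minimum (B's 'best' accumulator update)
def omin : Option Int → Option Int → Option Int
  | none, c => c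
  | some a, none => some a
  | some a, some b => some (min a b)

theorem omin_comm (a b : Option Int) : omin a b = omin b a := by
  rcases a with _ | a <;> rcases b with _ | b <;> simp [omin, min_comm]

theorem omin_assoc (a b c : Option Int) : omin (omin a b) c = omin a (omin b c) := by
  rcases a with _ | a <;> rcases b with _ | b <;> rcases c with _ | c <;> simp [omin, min_assoc]

-- index of the first marker matching a single line
def fmIdx (line : String) : Option Int :=
  match (PySem.List.enumerate pvMarkers).find? (fun js => PySem.Str.isIn js.2 line) with
  | some js => some js.1
  | none => none

theorem bStep_eq (st : Option Int × Option Int) (li : Int × String) :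
    bStep st li = (omin st.1 (fmIdx li.2),
      if PySem.Str.isIn "Traceback" li.2 then some li.1 else st.2) := by
  rcases st with ⟨b, t⟩
  unfold bStep fmIdx
  cases hf : (PySem.List.enumerate pvMarkers).find? (fun js => PySem.Str.isIn js.2 li.2) with
  | none => cases b <;> simp [omin]
  | some js =>
    cases b with
    | none => simp [omin]
    | some bv =>
      simp only [omin]
      refine congrArg (fun x => (x, _)) ?_
      split_ifs with h <;> simp only [Option.some.injEq] <;> omega

theorem fmIdx_eq (l : String) :
    fmIdx l =
      if PySem.Str.isIn "FileNotFoundError" l then some 0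
      else if PySem.Str.isIn "PermissionError" l then some 1
      else if PySem.Str.isIn "ValidationError" l then some 2
      else if PySem.Str.isIn "JSONDecodeError" l then some 3
      else none := by
  unfold fmIdx pvMarkers
  rw [PySem.List.enumerate.eq_2, PySem.List.enumerate.eq_2, PySem.List.enumerate.eq_2,
    PySem.List.enumerate.eq_2, PySem.List.enumerate.eq_1]
  by_cases h0 : PySem.Str.isIn "FileNotFoundError" l
  · rw [List.find?_cons_of_pos (by simpa using h0), if_pos h0]
  · rw [List.find?_cons_of_neg (by simpa using h0), if_neg h0]
    by_cases h1 : PySem.Str.isIn "PermissionError" l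
    · rw [List.find?_cons_of_pos (by simpa using h1), if_pos h1]
      decide
    · rw [List.find?_cons_of_neg (by simpa using h1), if_neg h1]
      by_cases h2 : PySem.Str.isIn "ValidationError" l
      · rw [List.find?_cons_of_pos (by simpa using h2), if_pos h2]
        decide
      · rw [List.find?_cons_of_neg (by simpa using h2), if_neg h2]
        by_cases h3 : PySem.Str.isIn "JSONDecodeError" l
        · rw [List.find?_cons_of_pos (by simpa using h3), if_pos h3]
          decide
        · rw [List.find?_cons_of_neg (by simpa using h3), if_neg h3]
          rfl

-- B's best accumulator over a whole line list = A's priority chain over per-line matches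
def cIdx (L : List String) : Option Int :=
  if L.any (fun x => PySem.Str.isIn "FileNotFoundError" x) then some 0
  else if L.any (fun x => PySem.Str.isIn "PermissionError" x) then some 1
  else if L.any (fun x => PySem.Str.isIn "ValidationError" x) then some 2
  else if L.any (fun x => PySem.Str.isIn "JSONDecodeError" x) then some 3
  else none

-- the per-line/rest split of the priority chain, on plain booleans
theorem chain_min (b0 b1 b2 b3 c0 c1 c2 c3 : Bool) :
    (if (b0 || c0) = true then some 0
     else if (b1 || c1) = true then some 1
     else if (b2 || c2) = true then some (2 : Int)
     else if (b3 || c3) = true then some 3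
     else none)
    = omin
        (if b0 = true then some 0
         else if b1 = true then some 1
         else if b2 = true then some 2
         else if b3 = true then some 3
         else none)
        (if c0 = true then some 0
         else if c1 = true then some 1
         else if c2 = true then some 2
         else if c3 = true then some 3
         else none) := by
  revert b0 b1 b2 b3 c0 c1 c2 c3
  decide

theorem cIdx_cons (ln : String) (L : List String) :
    cIdx (ln :: L) = omin (fmIdx ln) (cIdx L) := by
  rw [fmIdx_eq]
  unfold cIdx
  simp only [List.any_cons]
  exact chain_min _ _ _ _ _ _ _ _

theorem fold_rev_enum (L : List String) (k : Int) (b t : Option Int) :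
    ((PySem.List.enumerate L k).reverse.foldl bStep (b, t))
      = (omin b (cIdx L),
         match L.findIdx? (fun line => PySem.Str.isIn "Traceback" line) with
         | some i => some (k + i)
         | none => t) := by
  induction L generalizing k b t with
  | nil =>
    rw [PySem.List.enumerate.eq_1]
    simp only [List.reverse_nil, List.foldl_nil, List.findIdx?_nil, cIdx]
    simp only [List.any_nil, if_neg (by simp : ¬ (false : Bool) = true)]
    cases b <;> rfl
  | cons l L ih =>
    rw [PySem.List.enumerate.eq_2, List.reverse_cons, List.foldl_append]
    simp only [List.foldl_cons, List.foldl_nil]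
    rw [ih, bStep_eq]
    simp only [Prod.mk.injEq]
    constructor
    · rw [cIdx_cons, omin_comm (fmIdx l) (cIdx L), ← omin_assoc]
    · rw [List.findIdx?_cons]
      by_cases hT : PySem.Str.isIn "Traceback" l
      · rw [if_pos hT, if_pos hT]
        norm_num
      · simp only [hT, Bool.false_eq_true, if_false]
        cases hf : L.findIdx? (fun line => PySem.Str.isIn "Traceback" line) with
        | none => simp
        | some i =>
          simp only [Option.map_some]
          push_cast
          ring_nf

theorem pyGetD_types_0 : PySem.List.pyGetD pvTypes 0 "" = "file_not_found" := by decide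
theorem pyGetD_types_1 : PySem.List.pyGetD pvTypes 1 "" = "permission_denied" := by decide
theorem pyGetD_types_2 : PySem.List.pyGetD pvTypes 2 "" = "validation_error" := by decide
theorem pyGetD_types_3 : PySem.List.pyGetD pvTypes 3 "" = "json_decode_error" := by decide

-- ===== VERDICT (by name: the statement is the Claim_ definition above) =====
theorem parse_error_output_py_spec : Claim_equal_parse_error_output_py := by
  intro s _
  unfold Spec_parse_error_output_py
  obtain ⟨lines, hs, hL⟩ := split_lines s
  have h0 := isIn_any_lines "FileNotFoundError" s lines hL (by decide) (by decide)
  have h1 := isIn_any_lines "PermissionError" s lines hL (by decide) (by decide)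
  have h2 := isIn_any_lines "ValidationError" s lines hL (by decide) (by decide)
  have h3 := isIn_any_lines "JSONDecodeError" s lines hL (by decide) (by decide)
  have hT := isIn_any_lines "Traceback" s lines hL (by decide) (by decide)
  simp only [parse_error_output_py, parse_error_output_py_alt, hs, Option.getD_some]
  rw [fold_rev_enum, if_insert_error_type, h0, h1, h2, h3, hT]
  simp only [omin]
  cases hF : lines.findIdx? (fun line => PySem.Str.isIn "Traceback" line) with
  | none =>
    have hani : lines.any (fun line => PySem.Str.isIn "Traceback" line) = false := by
      have := List.findIdx?_isSome (p := fun line => PySem.Str.isIn "Traceback" line) (xs := lines)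
      rw [hF] at this
      simpa using this.symm
    rw [hani]
    simp only [Bool.false_eq_true, if_false, items2]
    unfold cIdx
    cases c0 : lines.any (fun l => PySem.Str.isIn "FileNotFoundError" l) <;>
    cases c1 : lines.any (fun l => PySem.Str.isIn "PermissionError" l) <;>
    cases c2 : lines.any (fun l => PySem.Str.isIn "ValidationError" l) <;>
    cases c3 : lines.any (fun l => PySem.Str.isIn "JSONDecodeError" l) <;>
    simp [pyGetD_types_0, pyGetD_types_1, pyGetD_types_2, pyGetD_types_3]
  | some i =>
    have hani : lines.any (fun line => PySem.Str.isIn "Traceback" line) = true := by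
      have := List.findIdx?_isSome (p := fun line => PySem.Str.isIn "Traceback" line) (xs := lines)
      rw [hF] at this
      simpa using this.symm
    rw [hani]
    simp only [if_true, items3]
    have htb : (lines.foldl tbStep ([], false)).1 = lines.drop i := by
      rw [tb_fold_false, hF]
      simp
    have hsl : PySem.List.slice lines (some ((0 : Int) + (i : Int))) none = lines.drop i := by
      rw [show ((0 : Int) + (i : Int)) = (i : Int) by ring,
        PySem.List.slice_from lines (by positivity)]
      simp
    rw [htb, hsl]
    unfold cIdx
    cases c0 : lines.any (fun l => PySem.Str.isIn "FileNotFoundError" l) <;>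
    cases c1 : lines.any (fun l => PySem.Str.isIn "PermissionError" l) <;>
    cases c2 : lines.any (fun l => PySem.Str.isIn "ValidationError" l) <;>
    cases c3 : lines.any (fun l => PySem.Str.isIn "JSONDecodeError" l) <;>
    simp [pyGetD_types_0, pyGetD_types_1, pyGetD_types_2, pyGetD_types_3]
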